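-- pv_equiv track=rewrite | github.com/yuichiinumaru/overpowers | skills/agent-daily-paper/scripts/run_digest.py | expand_keywords_for_query
-- ===== SOURCE A (Python) =====
-- def expand_keywords_for_query(keywords: list[str]) -> list[str]:
--     out: list[str] = []
--     for kw in keywords:
--         k = kw.strip()
--         if not k:
--             continue
--         out.append(k)
--         # Split phrase keywords to improve recall.
--         if " " in k:
--             parts = [p.strip() for p in k.split() if len(p.strip()) >= 4]
--             out.extend(parts)
--     return list(dict.fromkeys(out))
-- ===== SOURCE B (Python) =====
-- def expand_keywords_for_query(keywords: list[str]) -> list[str]: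
--     # Build the flat candidate stream, then dedupe by a repeated-filter sieve
--     # (each kept head is filtered out of the remainder) - no set/dict at all.
--     def cands(k: str) -> list[str]:
--         if " " in k:
--             return [k] + [p.strip() for p in k.split() if len(p.strip()) >= 4]
--         return [k]
--
--     xs = [c for kw in keywords for k in [kw.strip()] if k for c in cands(k)]
--     out: list[str] = []
--     while xs:
--         h = xs[0]
--         out.append(h)
--         xs = [x for x in xs[1:] if x != h]
--     return out
-- ===== Notes on version B (the rewrite author's own statement) =====
-- stated objective: alternative
-- what changed: B first builds the flat candidate stream with one comprehension, then deduplicates by a repeated-filter sieve (each kept head is filtered out of the remaining stream), using no dict/set at all, instead of A's interleaved build plus dict.fromkeys.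
import Mathlib
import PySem

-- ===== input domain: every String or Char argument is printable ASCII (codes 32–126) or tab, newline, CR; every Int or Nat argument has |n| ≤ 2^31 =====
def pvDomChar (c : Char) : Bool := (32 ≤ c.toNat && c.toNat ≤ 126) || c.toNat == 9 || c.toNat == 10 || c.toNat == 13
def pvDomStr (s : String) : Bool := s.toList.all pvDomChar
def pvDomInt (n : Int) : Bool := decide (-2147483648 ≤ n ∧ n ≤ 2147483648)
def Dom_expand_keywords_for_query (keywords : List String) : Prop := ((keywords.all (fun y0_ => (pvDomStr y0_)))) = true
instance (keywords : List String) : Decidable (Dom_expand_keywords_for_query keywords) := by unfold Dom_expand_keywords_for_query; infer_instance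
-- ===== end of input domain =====

-- B builds the flat candidate stream first and dedupes it with a repeated-filter sieve (no dict/set), instead of A's interleaved build plus dict.fromkeys: alternative algorithm, same result.


-- ===== PORT A =====
-- A's loop body: strip, skip empties, append k and (for phrases) its long parts.
def pvBodyA (out : List String) (kw : String) : List String :=
  let k := PySem.Str.strip kw
  if k = "" then out
  else
    let out := out ++ [k]
    if PySem.Str.isIn " " k then
      out ++ ((PySem.Str.split₀ k).filter
                (fun p => 4 ≤ PySem.Str.len (PySem.Str.strip p))).map PySem.Str.strip
    else out

def expand_keywords_for_query (keywords : List String) : List String :=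
  let out : List String := keywords.foldl pvBodyA []
  PySem.List.dedup out

-- ===== PORT B =====
-- Source B's cands(k): the keyword itself plus, for phrases, its long stripped parts.
def pvCands (k : String) : List String :=
  if PySem.Str.isIn " " k then
    [k] ++ ((PySem.Str.split₀ k).filter
              (fun p => 4 ≤ PySem.Str.len (PySem.Str.strip p))).map PySem.Str.strip
  else [k]

-- Source B's while loop: pop the head into out, filter it out of the rest.
def pvSieve (out : List String) (xs : List String) : List String :=
  match xs with
  | [] => out
  | h :: t => pvSieve (out ++ [h]) (t.filter (fun x => x ≠ h))
termination_by xs.length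
decreasing_by
  simp
  exact le_trans (List.length_filter_le _ _) (by simp)

def expand_keywords_for_query_alt (keywords : List String) : List String :=
  let xs := keywords.flatMap (fun kw =>
    let k := PySem.Str.strip kw
    if k = "" then [] else pvCands k)
  pvSieve [] xs

-- ===== PRECONDITION & SPEC =====
def Spec_expand_keywords_for_query (keywords : List String) (out : List String) : Prop := out = expand_keywords_for_query_alt keywords
instance (keywords : List String) (out : List String) : Decidable (Spec_expand_keywords_for_query keywords out) := by unfold Spec_expand_keywords_for_query; infer_instance

-- ===== CLAIM (what is proved, stated in full; the proofs are below) =====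
def Claim_equal_expand_keywords_for_query : Prop := ∀ (keywords : List String), Dom_expand_keywords_for_query keywords → Spec_expand_keywords_for_query keywords (expand_keywords_for_query keywords)

-- ===== LEMMAS AND PROOFS =====

-- Contribution of one keyword to the (pre-dedup) candidate stream.
def pvItems (kw : String) : List String :=
  let k := PySem.Str.strip kw
  if k = "" then [] else pvCands k

-- A's loop body appends exactly the per-keyword contribution.
theorem pvA_body_eq (out : List String) (kw : String) :
    pvBodyA out kw = out ++ pvItems kw := by
  unfold pvBodyA pvItems pvCands
  by_cases h : PySem.Str.strip kw = ""
  · simp [h]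
  · rw [if_neg h, if_neg h]
    by_cases h2 : PySem.Str.isIn " " (PySem.Str.strip kw) = true
    · rw [if_pos h2, if_pos h2]; simp
    · rw [if_neg h2, if_neg h2]

theorem pvA_fold (l : List String) (acc : List String) :
    l.foldl pvBodyA acc = l.foldl (fun out kw => out ++ pvItems kw) acc := by
  induction l generalizing acc with
  | nil => rfl
  | cons kw t ih => rw [List.foldl_cons, List.foldl_cons, pvA_body_eq]; exact ih _

theorem pvA_eq_dedup_flatMap (keywords : List String) :
    expand_keywords_for_query keywords = PySem.List.dedup (keywords.flatMap pvItems) := by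
  simp only [expand_keywords_for_query]
  rw [pvA_fold, PySem.List.foldl_append_eq_flatMap, List.nil_append]

-- Folding Set.add skips every element already in the accumulator's suffix part:
-- elements equal to some h already present can be filtered out.
theorem pv_foldl_add_filter (xs : List String) (acc : List String) (h : String)
    (hmem : h ∈ acc) :
    xs.foldl PySem.Set.add acc = (xs.filter (fun x => x ≠ h)).foldl PySem.Set.add acc := by
  induction xs generalizing acc with
  | nil => rfl
  | cons x t ih =>
    by_cases hx : x = h
    · subst hx
      have : PySem.Set.add acc x = acc := by
        simp [PySem.Set.add, PySem.Set.contains, hmem]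
      simp only [List.foldl_cons, List.filter_cons]
      rw [this]
      simp only [ne_eq, not_true_eq_false, decide_false]
      exact ih acc hmem
    · simp only [List.foldl_cons, List.filter_cons]
      simp only [ne_eq, hx, not_false_eq_true, decide_true]
      apply ih
      simp [PySem.Set.add, PySem.Set.contains]
      split <;> simp [hmem]

-- A leading element not occurring in xs stays in front of the fold.
theorem pv_foldl_add_cons (xs : List String) (s : List String) (a : String)
    (ha : a ∉ xs) :
    xs.foldl PySem.Set.add (a :: s) = a :: xs.foldl PySem.Set.add s := by
  induction xs generalizing s with
  | nil => rfl
  | cons x t ih =>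
    have hxa : x ≠ a := fun h => ha (h ▸ List.mem_cons_self)
    have hta : a ∉ t := fun h => ha (List.mem_cons_of_mem _ h)
    simp only [List.foldl_cons]
    have : PySem.Set.add (a :: s) x = a :: PySem.Set.add s x := by
      simp [PySem.Set.add, PySem.Set.contains, hxa]
      split <;> simp
    rw [this]
    exact ih _ hta

-- dedup's cons law: the head is kept and removed from the tail.
theorem pv_dedup_cons (h : String) (t : List String) :
    PySem.List.dedup (h :: t) = h :: PySem.List.dedup (t.filter (fun x => x ≠ h)) := by
  have e : ∀ l : List String, PySem.List.dedup l = l.foldl PySem.Set.add [] := by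
    intro l
    rw [PySem.List.dedup_eq_ofList, PySem.Set.ofList_eq_foldl]
  rw [e, e, List.foldl_cons]
  have h1 : PySem.Set.add ([] : List String) h = [h] := rfl
  rw [h1, pv_foldl_add_filter t [h] h (by simp), pv_foldl_add_cons]
  simp

-- The sieve loop computes out ++ dedup xs (strong induction on the stream length).
theorem pv_sieve_eq_dedup_aux (n : Nat) (xs : List String) (hn : xs.length ≤ n)
    (out : List String) : pvSieve out xs = out ++ PySem.List.dedup xs := by
  induction n generalizing xs out with
  | zero =>
    have : xs = [] := List.eq_nil_of_length_eq_zero (Nat.le_zero.mp hn)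
    subst this
    rw [pvSieve.eq_def]
    simp [PySem.List.dedup, PySem.Set.ofList]
  | succ n ih =>
    match xs with
    | [] =>
        rw [pvSieve.eq_def]
        simp [PySem.List.dedup, PySem.Set.ofList]
    | h :: t =>
      rw [pvSieve.eq_def]
      simp only []
      rw [ih _ (le_trans (List.length_filter_le _ _) (Nat.le_of_succ_le_succ hn)),
          pv_dedup_cons]
      simp

theorem pv_sieve_eq_dedup (xs : List String) (out : List String) :
    pvSieve out xs = out ++ PySem.List.dedup xs := by
  exact pv_sieve_eq_dedup_aux xs.length xs le_rfl out

theorem pvB_eq_dedup_flatMap (keywords : List String) :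
    expand_keywords_for_query_alt keywords = PySem.List.dedup (keywords.flatMap pvItems) := by
  simp only [expand_keywords_for_query_alt]
  rw [pv_sieve_eq_dedup]
  simp only [List.nil_append]
  rfl

-- ===== VERDICT (by name: the statement is the Claim_ definition above) =====
theorem expand_keywords_for_query_spec : Claim_equal_expand_keywords_for_query := by
  intro keywords _
  unfold Spec_expand_keywords_for_query
  rw [pvA_eq_dedup_flatMap, pvB_eq_dedup_flatMap]
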